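-- pv_equiv track=rewrite | github.com/xiaoqian-shen/Vgent | utils/data.py | group_subtitles_by_interval
-- ===== SOURCE A (Python) =====
-- def group_subtitles_by_interval(all_subtitles, interval_seconds=5):
--     combined_subtitles = {}
--     unique_combined_subtitles = set()
--
--     if not all_subtitles:
--         return {}
--
--     sorted_times = sorted(all_subtitles.keys())
--
--     current_group_start_time = (sorted_times[0] // interval_seconds) * interval_seconds
--     current_group_text = []
--
--     for time in sorted_times:
--         if time < current_group_start_time + interval_seconds:
--             if all_subtitles[time]:
--                 current_group_text.append(all_subtitles[time])
--         else:
--             if current_group_text: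
--                 combined_text = ' '.join(current_group_text).strip()
--                 if combined_text and combined_text not in unique_combined_subtitles:
--                     combined_subtitles[current_group_start_time] = combined_text
--                     unique_combined_subtitles.add(combined_text)
--
--             current_group_start_time = (time // interval_seconds) * interval_seconds
--             current_group_text = []
--             if all_subtitles[time]:
--                 current_group_text.append(all_subtitles[time])
--
--     if current_group_text:
--         combined_text = ' '.join(current_group_text).strip()
--         if combined_text and combined_text not in unique_combined_subtitles:
--             combined_subtitles[current_group_start_time] = combined_text
--
--     return dict(sorted(combined_subtitles.items()))
-- ===== SOURCE B (Python) =====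
-- def group_subtitles_by_interval(all_subtitles, interval_seconds=5):
--     if not all_subtitles:
--         return {}
--     # Pass 1: group the truthy texts by their interval bucket, in sorted-time order.
--     buckets = {}
--     for time in sorted(all_subtitles):
--         text = all_subtitles[time]
--         if text:
--             buckets.setdefault((time // interval_seconds) * interval_seconds, []).append(text)
--     # Pass 2: join each bucket, keep first occurrence of each combined text.
--     result = {}
--     seen = set()
--     for start, texts in buckets.items():
--         combined = ' '.join(texts).strip()
--         if combined and combined not in seen:
--             result[start] = combined
--             seen.add(combined)
--     return dict(sorted(result.items()))
-- ===== Notes on version B (the rewrite author's own statement) =====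
-- stated objective: simpler
-- what changed: Replaced A's streaming loop with explicit boundary detection and flush logic (tracking current group start, pending texts, and a trailing flush after the loop) by a two-pass group-by-then-reduce: pass 1 buckets the truthy texts by (time // interval_seconds) * interval_seconds into a dict over the sorted times, pass 2 joins each bucket and keeps the first occurrence of each combined text.
-- outside the precondition, e.g. on group_subtitles_by_interval({3: 'x', 4: 'y'}, -5): A returns {5: 'y'}, B returns {5: 'x y'}; on group_subtitles_by_interval({3: 'x'}, 0): A raises ZeroDivisionError, B raises ZeroDivisionError
import Mathlib
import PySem

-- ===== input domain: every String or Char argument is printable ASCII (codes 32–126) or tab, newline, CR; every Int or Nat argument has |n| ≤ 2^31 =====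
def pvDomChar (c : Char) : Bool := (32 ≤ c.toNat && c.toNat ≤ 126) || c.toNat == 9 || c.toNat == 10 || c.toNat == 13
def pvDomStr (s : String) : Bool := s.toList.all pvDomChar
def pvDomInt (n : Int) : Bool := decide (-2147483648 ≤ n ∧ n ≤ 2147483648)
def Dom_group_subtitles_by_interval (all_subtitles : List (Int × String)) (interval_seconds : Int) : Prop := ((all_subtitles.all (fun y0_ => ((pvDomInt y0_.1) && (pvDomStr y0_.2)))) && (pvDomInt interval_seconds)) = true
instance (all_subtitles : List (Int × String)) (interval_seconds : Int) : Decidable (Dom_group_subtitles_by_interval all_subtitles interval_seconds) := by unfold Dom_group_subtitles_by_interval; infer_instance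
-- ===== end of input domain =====

-- B replaces A's streaming boundary-flush loop by a two-pass group-by-bucket then join-and-dedup decomposition (objective: simpler).

-- ===== PORT A =====
-- all_subtitles[time] (time is always a present key; first-match lookup per the dict convention)
def pvGetA (subs : List (Int × String)) (t : Int) : String :=
  (((subs.find? (fun p => p.1 == t)).map Prod.snd).getD "")

-- the flush block of A's loop ('if current_group_text: …'); the final flush uses only its first component
def pvFlushA (start : Int) (group : List String) (comb : PySem.Dict Int String)
    (seen : PySem.Set String) : PySem.Dict Int String × PySem.Set String :=
  if group ≠ [] then
    let ct := PySem.Str.strip (PySem.Str.join " " group)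
    if ct ≠ "" ∧ ¬ ct ∈ seen then (comb.insert start ct, PySem.Set.add seen ct) else (comb, seen)
  else (comb, seen)

-- one iteration of A's 'for time in sorted_times' loop
def pvStepA (subs : List (Int × String)) (i : Int)
    (st : Int × List String × PySem.Dict Int String × PySem.Set String) (t : Int) :
    Int × List String × PySem.Dict Int String × PySem.Set String :=
  match st with
  | (start, group, comb, seen) =>
    if t < start + i then
      if pvGetA subs t ≠ "" then (start, group ++ [pvGetA subs t], comb, seen)
      else (start, group, comb, seen)
    else
      let cs := pvFlushA start group comb seen
      (((PySem.Int.floordiv t i) * i),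
       (if pvGetA subs t ≠ "" then [pvGetA subs t] else []), cs.1, cs.2)

def group_subtitles_by_interval (all_subtitles : List (Int × String)) (interval_seconds : Int) : List (Int × String) :=
  if all_subtitles = [] then []
  else
    let sorted_times := PySem.List.sorted (PySem.List.dedup (all_subtitles.map Prod.fst)) (fun x => x) false
    let start0 := (PySem.Int.floordiv (sorted_times.headD 0) interval_seconds) * interval_seconds
    let st := sorted_times.foldl (pvStepA all_subtitles interval_seconds)
      (start0, [], PySem.Dict.empty, PySem.Set.empty)
    PySem.List.sorted2 ((pvFlushA st.1 st.2.1 st.2.2.1 st.2.2.2).1).items Prod.fst Prod.snd false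

-- ===== PORT B =====
def pvGetB (subs : List (Int × String)) (t : Int) : String :=
  (((subs.find? (fun p => p.1 == t)).map Prod.snd).getD "")

-- pass 1: buckets.setdefault((time // i) * i, []).append(text) for truthy text
def pvBucketStepB (subs : List (Int × String)) (i : Int)
    (d : PySem.Dict Int (List String)) (t : Int) : PySem.Dict Int (List String) :=
  let text := pvGetB subs t
  if text ≠ "" then d.modify ((PySem.Int.floordiv t i) * i) [] (fun l => l ++ [text]) else d

-- pass 2: join each bucket, keep the first occurrence of each combined text
def pvJoinStepB (st : PySem.Dict Int String × PySem.Set String) (p : Int × List String) :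
    PySem.Dict Int String × PySem.Set String :=
  let combined := PySem.Str.strip (PySem.Str.join " " p.2)
  if combined ≠ "" ∧ ¬ combined ∈ st.2 then (st.1.insert p.1 combined, PySem.Set.add st.2 combined)
  else st

def group_subtitles_by_interval_alt (all_subtitles : List (Int × String)) (interval_seconds : Int) : List (Int × String) :=
  if all_subtitles = [] then []
  else
    let sorted_times := PySem.List.sorted (PySem.List.dedup (all_subtitles.map Prod.fst)) (fun x => x) false
    let buckets := sorted_times.foldl (pvBucketStepB all_subtitles interval_seconds) PySem.Dict.empty
    let res := buckets.items.foldl pvJoinStepB (PySem.Dict.empty, PySem.Set.empty)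
    PySem.List.sorted2 res.1.items Prod.fst Prod.snd false

-- ===== PRECONDITION & SPEC =====
-- Pre_ restricts nonempty inputs to a positive interval: interval_seconds = 0 makes A raise ZeroDivisionError,
-- and a negative interval is outside the natural domain of a duration parameter (A returns an accidental
-- last-text-wins value there that no caller would specify; the empty input returns {} for every interval).
def Pre_group_subtitles_by_interval (all_subtitles : List (Int × String)) (interval_seconds : Int) : Prop :=
  all_subtitles = [] ∨ 0 < interval_seconds
instance (all_subtitles : List (Int × String)) (interval_seconds : Int) : Decidable (Pre_group_subtitles_by_interval all_subtitles interval_seconds) := by unfold Pre_group_subtitles_by_interval; infer_instance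

def pvWitness_group_subtitles_by_interval : (List (Int × String)) × Int :=
  ([(3, "a"), (4, "b"), (9, "c"), (11, "a b")], 5)

def Spec_group_subtitles_by_interval (all_subtitles : List (Int × String)) (interval_seconds : Int) (out : List (Int × String)) : Prop := out = group_subtitles_by_interval_alt all_subtitles interval_seconds
instance (all_subtitles : List (Int × String)) (interval_seconds : Int) (out : List (Int × String)) : Decidable (Spec_group_subtitles_by_interval all_subtitles interval_seconds out) := by unfold Spec_group_subtitles_by_interval; infer_instance

-- ===== CLAIM (what is proved, stated in full; the proofs are below) =====
def Claim_equal_group_subtitles_by_interval : Prop := ∀ (all_subtitles : List (Int × String)) (interval_seconds : Int), Dom_group_subtitles_by_interval all_subtitles interval_seconds → Pre_group_subtitles_by_interval all_subtitles interval_seconds → Spec_group_subtitles_by_interval all_subtitles interval_seconds (group_subtitles_by_interval all_subtitles interval_seconds)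

-- ===== LEMMAS AND PROOFS =====

-- arithmetic about the bucket key (time // i) * i, for i > 0
theorem pvBkt_le (i t : Int) (hi : 0 < i) : (PySem.Int.floordiv t i) * i ≤ t := by
  have h := PySem.Int.floordiv_mul_add_mod t i
  have h0 : 0 ≤ PySem.Int.mod t i := by
    rw [PySem.Int.mod_eq_emod_of_pos hi]; exact Int.emod_nonneg t (ne_of_gt hi)
  omega

theorem pvBkt_eq (i s t : Int) (hi : 0 < i) (hdvd : i ∣ s) (h1 : s ≤ t) (h2 : t < s + i) :
    (PySem.Int.floordiv t i) * i = s := by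
  obtain ⟨q, rfl⟩ := hdvd
  have hq : PySem.Int.floordiv t i = q := by
    rw [PySem.Int.floordiv_eq_iff_of_pos hi]
    constructor
    · calc q * i = i * q := mul_comm q i
      _ ≤ t := h1
    · have : (q + 1) * i = i * q + i := by ring
      omega
  rw [hq]; exact mul_comm q i

theorem pvBkt_ge (i s t : Int) (hi : 0 < i) (hdvd : i ∣ s) (h : s + i ≤ t) :
    s + i ≤ (PySem.Int.floordiv t i) * i := by
  obtain ⟨q, rfl⟩ := hdvd
  have hle : q + 1 ≤ PySem.Int.floordiv t i := by
    rw [PySem.Int.le_floordiv_iff_mul_le hi]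
    have : (q + 1) * i = i * q + i := by ring
    omega
  have := mul_le_mul_of_nonneg_right hle (le_of_lt hi)
  have h2 : (q + 1) * i = i * q + i := by ring
  omega

theorem pvBkt_dvd (i t : Int) : i ∣ (PySem.Int.floordiv t i) * i :=
  ⟨PySem.Int.floordiv t i, mul_comm _ _⟩

-- first-match lookup in a literal dict whose earlier keys differ from s
theorem pvGet?_mk_append {ν : Type} (pre : List (Int × ν)) (s : Int) (g : ν)
    (h : ∀ p ∈ pre, p.1 ≠ s) :
    (PySem.Dict.mk (pre ++ [(s, g)])).get? s = some g := by
  induction pre with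
  | nil => simp [PySem.Dict.get?_mk_cons]
  | cons p pre ih =>
    obtain ⟨k, v⟩ := p
    have hk : k ≠ s := h (k, v) (List.mem_cons_self)
    simp only [List.cons_append, PySem.Dict.get?_mk_cons, beq_iff_eq, if_neg hk]
    exact ih (fun q hq => h q (List.mem_cons_of_mem _ hq))

theorem pvGet?_mk_none {ν : Type} (l : List (Int × ν)) (s : Int)
    (h : ∀ p ∈ l, p.1 ≠ s) : (PySem.Dict.mk l).get? s = none := by
  induction l with
  | nil => simp [PySem.Dict.get?]
  | cons p l ih =>
    obtain ⟨k, v⟩ := p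
    have hk : k ≠ s := h (k, v) (List.mem_cons_self)
    simp only [PySem.Dict.get?_mk_cons, beq_iff_eq, if_neg hk]
    exact ih (fun q hq => h q (List.mem_cons_of_mem _ hq))

-- the chunk decomposition: the groups A's streaming loop forms on a time list
def pvChunks (subs : List (Int × String)) (i : Int) :
    List Int → Int → List String → List (Int × List String)
  | [], start, group => if group = [] then [] else [(start, group)]
  | t :: ts, start, group =>
    if t < start + i then
      pvChunks subs i ts start (group ++ (if pvGetA subs t ≠ "" then [pvGetA subs t] else []))
    else
      (if group = [] then ([] : List (Int × List String)) else [(start, group)])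
        ++ pvChunks subs i ts ((PySem.Int.floordiv t i) * i)
            (if pvGetA subs t ≠ "" then [pvGetA subs t] else [])

-- flushing one nonempty chunk is one pass-2 step of B
theorem pvFlush_eq_join (start : Int) (group : List String) (comb : PySem.Dict Int String)
    (seen : PySem.Set String) (hg : group ≠ []) :
    pvFlushA start group comb seen = pvJoinStepB (comb, seen) (start, group) := by
  simp [pvFlushA, pvJoinStepB, hg]

-- A's whole loop + final flush = pass 2 of B run over the chunk list
set_option maxHeartbeats 1000000 in
theorem pvLA (subs : List (Int × String)) (i : Int) :
    ∀ (ts : List Int) (start : Int) (group : List String)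
      (comb : PySem.Dict Int String) (seen : PySem.Set String),
    (pvFlushA (ts.foldl (pvStepA subs i) (start, group, comb, seen)).1
      (ts.foldl (pvStepA subs i) (start, group, comb, seen)).2.1
      (ts.foldl (pvStepA subs i) (start, group, comb, seen)).2.2.1
      (ts.foldl (pvStepA subs i) (start, group, comb, seen)).2.2.2).1
    = ((pvChunks subs i ts start group).foldl pvJoinStepB (comb, seen)).1 := by
  intro ts
  induction ts with
  | nil =>
    intro start group comb seen
    by_cases hg : group = []
    · simp [pvChunks, hg, pvFlushA]
    · simp [pvChunks, hg, List.foldl, pvFlush_eq_join _ _ _ _ hg]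
  | cons t ts ih =>
    intro start group comb seen
    simp only [List.foldl_cons, pvStepA]
    by_cases hlt : t < start + i
    · rw [if_pos hlt]
      by_cases htxt : pvGetA subs t ≠ ""
      · simp only [if_pos htxt, pvChunks, if_pos hlt]
        exact ih start (group ++ [pvGetA subs t]) comb seen
      · simp only [pvChunks, if_pos hlt, if_neg htxt, List.append_nil]
        exact ih start group comb seen
    · rw [if_neg hlt]
      simp only [pvChunks, if_neg hlt, List.foldl_append]
      by_cases hg : group = []
      · subst hg
        have hfl : pvFlushA start [] comb seen = (comb, seen) := by simp [pvFlushA]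
        simp only [hfl, ite_true, List.foldl_nil]
        exact ih ((PySem.Int.floordiv t i) * i)
          (if pvGetA subs t ≠ "" then [pvGetA subs t] else []) comb seen
      · rw [pvFlush_eq_join _ _ _ _ hg]
        simp only [if_neg hg, List.foldl_cons, List.foldl_nil]
        generalize pvJoinStepB (comb, seen) (start, group) = q
        obtain ⟨c, e⟩ := q
        exact ih ((PySem.Int.floordiv t i) * i)
          (if pvGetA subs t ≠ "" then [pvGetA subs t] else []) c e

-- pvGetB is definitionally pvGetA (the same first-match lookup)
theorem pvGetB_eq : pvGetB = pvGetA := rfl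

-- modify on a key already sitting at the end of the dict appends to its list
theorem pvModify_last (pre : List (Int × List String)) (s : Int) (g : List String) (text : String)
    (h : ∀ p ∈ pre, p.1 ≠ s) :
    (PySem.Dict.mk (pre ++ [(s, g)])).modify s [] (fun l => l ++ [text])
      = PySem.Dict.mk (pre ++ [(s, g ++ [text])]) := by
  have hget : (PySem.Dict.mk (pre ++ [(s, g)])).get? s = some g := pvGet?_mk_append pre s g h
  have hcon : (PySem.Dict.mk (pre ++ [(s, g)])).contains s = true := by
    rw [PySem.Dict.contains_eq_isSome_get?, hget]; rfl
  have hgd : (PySem.Dict.mk (pre ++ [(s, g)])).getD s [] = g := by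
    rw [PySem.Dict.getD_eq_get?_getD, hget]; rfl
  apply PySem.Dict.ext
  simp only [PySem.Dict.modify, hgd]
  rw [PySem.Dict.items_insert_of_contains _ _ hcon]
  show (pre ++ [(s, g)]).map (fun p => if p.1 == s then (s, g ++ [text]) else p) = _
  rw [List.map_append]
  congr 1
  · rw [List.map_congr_left (g := id) (fun p hp => by simp [h p hp]), List.map_id]
  · simp

-- modify on an absent key appends a fresh singleton entry
theorem pvModify_new (l : List (Int × List String)) (s : Int) (text : String)
    (h : ∀ p ∈ l, p.1 ≠ s) :
    (PySem.Dict.mk l).modify s [] (fun x => x ++ [text]) = PySem.Dict.mk (l ++ [(s, [text])]) := by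
  have hget : (PySem.Dict.mk l).get? s = none := pvGet?_mk_none l s h
  have hcon : (PySem.Dict.mk l).contains s = false := by
    rw [PySem.Dict.contains_eq_isSome_get?, hget]; rfl
  have hgd : (PySem.Dict.mk l).getD s [] = [] := by
    rw [PySem.Dict.getD_eq_get?_getD, hget]; rfl
  apply PySem.Dict.ext
  simp only [PySem.Dict.modify, hgd]
  rw [PySem.Dict.items_insert_of_not_contains _ _ hcon]
  rfl

-- B's pass 1 over a strictly increasing time list produces exactly the chunk list
theorem pvLB (subs : List (Int × String)) (i : Int) (hi : 0 < i) :
    ∀ (ts : List Int) (pre : List (Int × List String)) (start : Int) (group : List String),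
    ts.Pairwise (· < ·) → (∀ t ∈ ts, start ≤ t) → i ∣ start →
    (∀ p ∈ pre, p.1 < start) →
    (ts.foldl (pvBucketStepB subs i)
        (PySem.Dict.mk (pre ++ (if group = [] then [] else [(start, group)])))).items
    = pre ++ pvChunks subs i ts start group := by
  intro ts
  induction ts with
  | nil =>
    intro pre start group _ _ _ _
    by_cases hg : group = [] <;> simp [pvChunks, hg]
  | cons t ts ih =>
    intro pre start group hp hge hdvd hpre
    have hp' : ts.Pairwise (· < ·) := hp.of_cons
    have hlt_all : ∀ t' ∈ ts, t < t' := (List.pairwise_cons.mp hp).1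
    have hst : start ≤ t := hge t List.mem_cons_self
    have hge' : ∀ t' ∈ ts, start ≤ t' := fun t' h' => le_of_lt (lt_of_le_of_lt hst (hlt_all t' h'))
    simp only [List.foldl_cons, pvBucketStepB, pvGetB_eq]
    by_cases hcase : t < start + i
    · -- t falls in the pending bucket
      have hb : (PySem.Int.floordiv t i) * i = start := pvBkt_eq i start t hi hdvd hst hcase
      by_cases htxt : pvGetA subs t ≠ ""
      · rw [if_pos htxt, hb]
        by_cases hg : group = []
        · subst hg
          rw [if_pos rfl, List.append_nil,
            pvModify_new pre start (pvGetA subs t) (fun p hp0 => ne_of_lt (hpre p hp0))]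
          have h2 := ih pre start [pvGetA subs t] hp' hge' hdvd hpre
          rw [if_neg (List.cons_ne_nil _ _)] at h2
          rw [h2]
          simp [pvChunks, if_pos hcase, htxt]
        · rw [if_neg hg,
            pvModify_last pre start group (pvGetA subs t) (fun p hp0 => ne_of_lt (hpre p hp0))]
          have h2 := ih pre start (group ++ [pvGetA subs t]) hp' hge' hdvd hpre
          rw [if_neg (by simp)] at h2
          rw [h2]
          simp [pvChunks, if_pos hcase, htxt]
      · rw [if_neg htxt]
        rw [ih pre start group hp' hge' hdvd hpre]
        simp [pvChunks, if_pos hcase, htxt]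
    · -- t starts a new bucket strictly to the right of everything so far
      have hti : start + i ≤ t := by omega
      have hge2 : start + i ≤ (PySem.Int.floordiv t i) * i := pvBkt_ge i start t hi hdvd hti
      have hble : (PySem.Int.floordiv t i) * i ≤ t := pvBkt_le i t hi
      have hpre' : ∀ p ∈ pre ++ (if group = [] then [] else [(start, group)]),
          p.1 < (PySem.Int.floordiv t i) * i := by
        intro p hp0
        rcases List.mem_append.mp hp0 with h1 | h1
        · have := hpre p h1; omega
        · by_cases hg : group = []
          · rw [if_pos hg] at h1; cases h1
          · rw [if_neg hg] at h1
            simp only [List.mem_singleton] at h1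
            subst h1; simp only; omega
      have hgeB : ∀ t' ∈ ts, (PySem.Int.floordiv t i) * i ≤ t' :=
        fun t' h' => le_of_lt (lt_of_le_of_lt hble (hlt_all t' h'))
      have hne : ([pvGetA subs t] : List String) ≠ [] := List.cons_ne_nil _ _
      by_cases htxt : pvGetA subs t ≠ ""
      · rw [if_pos htxt,
          pvModify_new _ ((PySem.Int.floordiv t i) * i) (pvGetA subs t)
            (fun p hp0 => ne_of_lt (hpre' p hp0))]
        have h2 := ih (pre ++ (if group = [] then [] else [(start, group)]))
          ((PySem.Int.floordiv t i) * i) [pvGetA subs t] hp' hgeB (pvBkt_dvd i t) hpre'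
        rw [if_neg hne] at h2
        rw [h2]
        simp [pvChunks, if_neg hcase, htxt, List.append_assoc]
      · rw [if_neg htxt]
        have h2 := ih (pre ++ (if group = [] then [] else [(start, group)]))
          ((PySem.Int.floordiv t i) * i) [] hp' hgeB (pvBkt_dvd i t) hpre'
        rw [if_pos rfl, List.append_nil] at h2
        rw [h2]
        simp [pvChunks, if_neg hcase, htxt, List.append_assoc]

-- the two ports agree on nonempty input with positive interval
theorem pvMain (subs : List (Int × String)) (i : Int) (hs : subs ≠ []) (hi : 0 < i) :
    group_subtitles_by_interval subs i = group_subtitles_by_interval_alt subs i := by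
  rcases hts : PySem.List.sorted (PySem.List.dedup (subs.map Prod.fst)) (fun x => x) false with _ | ⟨t0, r⟩
  · exfalso
    have h := (PySem.List.sorted_eq_nil_iff _ _ _).mp hts
    cases subs with
    | nil => exact hs rfl
    | cons p rest =>
      have hm : p.1 ∈ PySem.List.dedup ((p :: rest).map Prod.fst) :=
        (PySem.List.mem_dedup _ _).mpr (by simp)
      rw [h] at hm
      cases hm
  · have hp : (t0 :: r).Pairwise (· < ·) := by
      rw [← hts, PySem.List.dedup_eq_ofList]
      exact PySem.List.sorted_ofList_pairwise_lt _
    have hge : ∀ t ∈ t0 :: r, (PySem.Int.floordiv t0 i) * i ≤ t := by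
      intro t ht
      have h0 : (PySem.Int.floordiv t0 i) * i ≤ t0 := pvBkt_le i t0 hi
      rcases List.mem_cons.mp ht with h1 | h1
      · omega
      · have := (List.pairwise_cons.mp hp).1 t h1; omega
    have hLB := pvLB subs i hi (t0 :: r) [] ((PySem.Int.floordiv t0 i) * i) [] hp hge
      (pvBkt_dvd i t0) (by intro p hp0; cases hp0)
    rw [if_pos rfl, List.append_nil, List.nil_append] at hLB
    simp only [group_subtitles_by_interval, group_subtitles_by_interval_alt, if_neg hs, hts,
      List.headD_cons]
    rw [pvLA subs i (t0 :: r) ((PySem.Int.floordiv t0 i) * i) [] PySem.Dict.empty PySem.Set.empty]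
    have hempty : PySem.Dict.mk ([] : List (Int × List String)) = PySem.Dict.empty := rfl
    rw [hempty] at hLB
    rw [hLB]

-- ===== VERDICT (by name: the statement is the Claim_ definition above) =====
theorem group_subtitles_by_interval_spec : Claim_equal_group_subtitles_by_interval := by
  intro subs i _ hpre
  unfold Spec_group_subtitles_by_interval
  by_cases hs : subs = []
  · simp [group_subtitles_by_interval, group_subtitles_by_interval_alt, hs]
  · rcases hpre with h | hi
    · exact absurd h hs
    · exact pvMain subs i hs hi
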